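-- pv_equiv track=rewrite | github.com/Manna-na/algorithm-study | 프로그래머스/2/42577. 전화번호 목록/전화번호 목록.py | solution
-- ===== SOURCE A (Python) =====
-- def solution(phone_book):
--     answer = True
--     dict = {}
--     for p in phone_book:
--         dict[p] = True
--     for phone in phone_book:
--         temp = ""
--         for p in phone:
--             temp += p
--             if temp in dict and temp != phone:
--                 return False
--     return answer
-- ===== SOURCE B (Python) =====
-- def solution(phone_book):
--     book = sorted(phone_book)
--     for a, b in zip(book, book[1:]):
--         if 0 < len(a) < len(b) and b.startswith(a):
--             return False
--     return True
-- ===== Notes on version B (the rewrite author's own statement) =====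
-- stated objective: alternative
-- what changed: Replaces A's dict of all numbers plus per-character prefix enumeration for every number with a lexicographic sort followed by a single scan of adjacent pairs (a proper prefix, if any, must make some adjacent sorted pair a prefix pair); the 0 < len(a) < len(b) guard keeps duplicates and the empty string from counting as prefixes, exactly as in A.
import Mathlib
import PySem

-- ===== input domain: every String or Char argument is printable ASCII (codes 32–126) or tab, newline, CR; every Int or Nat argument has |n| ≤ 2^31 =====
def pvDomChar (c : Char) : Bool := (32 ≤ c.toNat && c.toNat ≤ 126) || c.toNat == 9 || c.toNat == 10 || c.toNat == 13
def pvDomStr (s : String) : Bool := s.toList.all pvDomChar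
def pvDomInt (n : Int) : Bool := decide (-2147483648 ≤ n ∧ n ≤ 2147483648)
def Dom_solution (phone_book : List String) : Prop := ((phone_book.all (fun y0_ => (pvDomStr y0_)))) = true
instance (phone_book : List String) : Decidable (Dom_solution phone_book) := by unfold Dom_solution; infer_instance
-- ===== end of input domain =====

-- B replaces A's dict + per-character prefix enumeration with a lexicographic sort
-- followed by one scan of adjacent pairs; the 0 < len(a) < len(b) guard keeps
-- duplicates and the empty string from counting as prefixes, exactly as in A.

-- ===== PORT A =====
-- inner 'for p in phone:' loop; returns true iff the Python hits 'return False'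
def solAInner (d : PySem.Dict String Bool) (phone : String) : List Char → List Char → Bool
  | _temp, [] => false
  | temp, p :: rest =>
    let temp' := temp ++ [p]
    if d.contains (String.ofList temp') && (String.ofList temp' != phone) then true
    else solAInner d phone temp' rest

-- outer 'for phone in phone_book:' loop
def solAOuter (d : PySem.Dict String Bool) : List String → Bool
  | [] => true
  | phone :: rest =>
    if solAInner d phone [] phone.toList then false else solAOuter d rest

def solution (phone_book : List String) : Bool :=
  let d : PySem.Dict String Bool :=
    phone_book.foldl (fun d p => d.insert p true) PySem.Dict.empty
  solAOuter d phone_book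

-- ===== PORT B =====
-- 'for a, b in zip(book, book[1:]):' with the early 'return False'
def solBLoop : List (String × String) → Bool
  | [] => true
  | (a, b) :: rest =>
    if 0 < PySem.Str.len a && PySem.Str.len a < PySem.Str.len b && PySem.Str.startswith b a
    then false
    else solBLoop rest

def solution_alt (phone_book : List String) : Bool :=
  let book := PySem.List.sorted phone_book (fun s => s)
  solBLoop (book.zip (PySem.List.slice book (some 1) none))

-- ===== PRECONDITION & SPEC =====
def Spec_solution (phone_book : List String) (out : Bool) : Prop := out = solution_alt phone_book
instance (phone_book : List String) (out : Bool) : Decidable (Spec_solution phone_book out) := by unfold Spec_solution; infer_instance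

-- ===== CLAIM (what is proved, stated in full; the proofs are below) =====
def Claim_equal_solution : Prop := ∀ (phone_book : List String), Dom_solution phone_book → Spec_solution phone_book (solution phone_book)

-- ===== LEMMAS AND PROOFS =====

-- the common characterisation: some nonempty number is a proper prefix of another number
def HasPrefPair (book : List String) : Prop :=
  ∃ x ∈ book, ∃ y ∈ book, x.toList ≠ [] ∧ x ≠ y ∧ x.toList <+: y.toList

-- A's dict is just a membership structure for phone_book
theorem dict_contains (book : List String) (s : String) :
    (book.foldl (fun d p => d.insert p true) (PySem.Dict.empty (κ := String) (ν := Bool))).contains s = true ↔ s ∈ book := by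
  rw [PySem.Dict.contains_iff_mem_keys, PySem.Dict.keys_foldl_insert]
  simpa [PySem.Dict.keys_empty, PySem.Set.update, PySem.Set.ofList_eq_foldl] using
    (PySem.Set.mem_ofList book s)

-- A's inner loop hits 'return False' iff some nonempty prefix of the remaining
-- characters extends temp to a dict key different from phone
theorem solAInner_true_iff (d : PySem.Dict String Bool) (phone : String) (cs temp : List Char) :
    solAInner d phone temp cs = true ↔
      ∃ t, t ≠ [] ∧ t <+: cs ∧ d.contains (String.ofList (temp ++ t)) = true ∧
        String.ofList (temp ++ t) ≠ phone := by
  induction cs generalizing temp with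
  | nil =>
    simp only [solAInner]
    constructor
    · intro h; exact absurd h (by simp)
    · rintro ⟨t, ht0, hp, -⟩
      exact absurd (List.prefix_nil.mp hp) ht0
  | cons c cs ih =>
    simp only [solAInner]
    by_cases hc : d.contains (String.ofList (temp ++ [c])) = true ∧ String.ofList (temp ++ [c]) ≠ phone
    · rw [if_pos (by rw [Bool.and_eq_true]; exact ⟨hc.1, bne_iff_ne.mpr hc.2⟩)]
      constructor
      · intro _
        exact ⟨[c], by simp, by simp, hc.1, hc.2⟩
      · intro _; rfl
    · have hcond : ¬ (d.contains (String.ofList (temp ++ [c])) && (String.ofList (temp ++ [c]) != phone)) = true := by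
        simpa [bne_iff_ne, -Bool.and_eq_true] using fun h1 h2 => hc ⟨h1, h2⟩
      rw [if_neg (by simpa using hcond)]
      rw [ih]
      constructor
      · rintro ⟨t, ht0, hp, h1, h2⟩
        exact ⟨c :: t, by simp, by simpa using hp, by simpa using h1, by simpa using h2⟩
      · rintro ⟨t, ht0, hp, h1, h2⟩
        obtain ⟨t', rfl⟩ : ∃ t', t = c :: t' := by
          cases t with
          | nil => exact absurd rfl ht0
          | cons a t' =>
            obtain ⟨rfl, -⟩ := by simpa using hp
            exact ⟨t', rfl⟩
        rcases eq_or_ne t' [] with rfl | ht'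
        · exact absurd ⟨by simpa using h1, by simpa using h2⟩ hc
        · exact ⟨t', ht', by simpa using hp, by simpa using h1, by simpa using h2⟩

theorem solAOuter_false_iff (d : PySem.Dict String Bool) (book : List String) :
    solAOuter d book = false ↔ ∃ phone ∈ book, solAInner d phone [] phone.toList = true := by
  induction book with
  | nil => simp [solAOuter]
  | cons phone rest ih =>
    rw [solAOuter]
    by_cases h : solAInner d phone [] phone.toList = true
    · rw [if_pos h]
      exact ⟨fun _ => ⟨phone, List.mem_cons_self, h⟩, fun _ => rfl⟩
    · rw [if_neg h, ih]
      constructor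
      · rintro ⟨p, hp, hh⟩; exact ⟨p, List.mem_cons_of_mem _ hp, hh⟩
      · rintro ⟨p, hp, hh⟩
        rcases List.mem_cons.mp hp with rfl | hp'
        · exact absurd hh h
        · exact ⟨p, hp', hh⟩

theorem solution_false_iff (book : List String) :
    solution book = false ↔ HasPrefPair book := by
  unfold solution HasPrefPair
  rw [solAOuter_false_iff]
  constructor
  · rintro ⟨phone, hmem, hinner⟩
    obtain ⟨t, ht0, hpre, hcont, hne⟩ := (solAInner_true_iff _ _ _ _).mp hinner
    rw [dict_contains] at hcont
    refine ⟨String.ofList t, by simpa using hcont, phone, hmem, by simpa using ht0,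
      by simpa using hne, by simpa using hpre⟩
  · rintro ⟨x, hx, y, hy, h0, hne, hpre⟩
    refine ⟨y, hy, (solAInner_true_iff _ _ _ _).mpr ⟨x.toList, h0, hpre, ?_, ?_⟩⟩
    · rw [List.nil_append, dict_contains]; simpa using hx
    · simpa using hne

-- B's pair test is exactly 'nonempty proper prefix'
theorem cond_iff (a b : String) :
    (0 < PySem.Str.len a && PySem.Str.len a < PySem.Str.len b && PySem.Str.startswith b a) = true ↔
      (a.toList ≠ [] ∧ a ≠ b ∧ a.toList <+: b.toList) := by
  simp only [Bool.and_eq_true, decide_eq_true_eq, PySem.Str.len, PySem.Str.startswith_eq,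
    PySem.Chars.startswith_iff, Int.natCast_pos, Nat.cast_lt]
  constructor
  · rintro ⟨⟨h0, hlen⟩, hpre⟩
    refine ⟨List.length_pos_iff.mp h0, ?_, hpre⟩
    intro he; rw [he] at hlen; omega
  · rintro ⟨h0, hne, hpre⟩
    have hanb : a.toList ≠ b.toList := fun he => hne (String.toList_inj.mp he)
    exact ⟨⟨List.length_pos_iff.mpr h0,
      lt_of_le_of_ne hpre.length_le (fun he => hanb (hpre.eq_of_length he))⟩, hpre⟩

theorem solBLoop_false_iff (ps : List (String × String)) :
    solBLoop ps = false ↔ ∃ p ∈ ps, (p.1.toList ≠ [] ∧ p.1 ≠ p.2 ∧ p.1.toList <+: p.2.toList) := by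
  induction ps with
  | nil => simp [solBLoop]
  | cons q rest ih =>
    obtain ⟨a, b⟩ := q
    rw [solBLoop]
    by_cases hc : (a.toList ≠ [] ∧ a ≠ b ∧ a.toList <+: b.toList)
    · rw [if_pos ((cond_iff a b).mpr hc)]
      constructor
      · intro _; exact ⟨(a, b), List.mem_cons_self, hc⟩
      · intro _; rfl
    · rw [if_neg (fun h => hc ((cond_iff a b).mp h)), ih]
      constructor
      · rintro ⟨p, hp, h⟩; exact ⟨p, List.mem_cons_of_mem _ hp, h⟩
      · rintro ⟨p, hp, h⟩
        rcases List.mem_cons.mp hp with rfl | hp'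
        · exact absurd h hc
        · exact ⟨p, hp', h⟩

-- a proper prefix is lexicographically smaller
theorem lt_of_proper_prefix (a b : List Char) (h : a <+: b) (hne : a ≠ b) : a < b := by
  induction a generalizing b with
  | nil =>
    cases b with
    | nil => exact absurd rfl hne
    | cons x xs => exact List.Lex.nil
  | cons x xs ih =>
    obtain ⟨t, rfl⟩ := h
    cases t with
    | nil => exact absurd (by simp) hne
    | cons c cs =>
      exact List.Lex.cons (ih _ ⟨c :: cs, by simp⟩ (by simp))

-- the middle-element lemma: x ≤ m ≤ z and x a prefix of z force x a prefix of m
theorem prefix_of_between (x m z : List Char) (hp : x <+: z) (h1 : ¬ m < x) (h2 : ¬ z < m) :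
    x <+: m := by
  induction x generalizing m z with
  | nil => exact List.nil_prefix
  | cons c x' ih =>
    obtain ⟨t, rfl⟩ := hp
    cases m with
    | nil => exact absurd List.Lex.nil h1
    | cons d m' =>
      have hcd : c = d := by
        rcases lt_trichotomy c d with h | h | h
        · exact absurd (List.Lex.rel h) h2
        · exact h
        · exact absurd (List.Lex.rel h) h1
      subst hcd
      have hm : ¬ m' < x' := fun hh => h1 (List.Lex.cons hh)
      have hz : ¬ (x' ++ t) < m' := fun hh => h2 (List.Lex.cons hh)
      exact List.cons_prefix_cons.mpr ⟨rfl, ih m' (x' ++ t) ⟨t, rfl⟩ hm hz⟩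

-- membership in zip(book, book[1:]) is exactly 'adjacent pair'
theorem zip_tail_mem (L : List String) (p : String × String) :
    p ∈ L.zip (L.drop 1) ↔ ∃ i, ∃ h : i + 1 < L.length, p = (L[i], L[i+1]) := by
  rw [List.mem_iff_getElem]
  constructor
  · rintro ⟨i, hi, he⟩
    have hi' : i + 1 < L.length := by simp [List.length_zip] at hi; omega
    exact ⟨i, hi', by rw [← he]; simp [List.getElem_zip]⟩
  · rintro ⟨i, hi, rfl⟩
    exact ⟨i, by simp [List.length_zip]; omega, by simp [List.getElem_zip]⟩

-- in a sorted list, any proper-prefix pair yields an ADJACENT proper-prefix pair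
theorem adjacent_of_pair (L : List String) (hL : L.Pairwise (· ≤ ·))
    (i j : Nat) (hij : i < j) (hj : j < L.length)
    (hpre : L[i].toList <+: L[j].toList) (hne0 : L[i].toList ≠ []) (hne : L[i] ≠ L[j]) :
    ∃ k, ∃ h : k + 1 < L.length,
      L[k].toList ≠ [] ∧ L[k] ≠ L[k+1] ∧ L[k].toList <+: L[k+1].toList := by
  have hGE := List.pairwise_iff_getElem.mp hL
  obtain ⟨d, hd⟩ : ∃ d, j - i = d := ⟨j - i, rfl⟩
  induction d generalizing i with
  | zero => omega
  | succ d ih =>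
    have hi1 : i + 1 ≤ j := hij
    rcases eq_or_lt_of_le hi1 with he | hlt
    · refine ⟨i, by omega, hne0, ?_, ?_⟩
      · have : L[i+1]'(by omega) = L[j] := by congr 1
        rw [this]; exact hne
      · have : L[i+1]'(by omega) = L[j] := by congr 1
        rw [this]; exact hpre
    · have hxm : L[i] ≤ L[i+1]'(by omega) := hGE i (i+1) (by omega) (by omega) (by omega)
      have hmz : L[i+1]'(by omega) ≤ L[j] := hGE (i+1) j (by omega) hj hlt
      have hpm : L[i].toList <+: (L[i+1]'(by omega)).toList :=
        prefix_of_between _ _ _ hpre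
          (Std.not_lt.mpr (String.le_iff_toList_le.mp hxm))
          (Std.not_lt.mpr (String.le_iff_toList_le.mp hmz))
      by_cases heq : L[i] = L[i+1]'(by omega)
      · exact ih (i+1) (by omega) (by rw [← heq]; exact hpre) (by rw [← heq]; exact hne0)
          (by rw [← heq]; exact hne) (by omega)
      · exact ⟨i, by omega, hne0, heq, hpm⟩

theorem solution_alt_false_iff (book : List String) :
    solution_alt book = false ↔ HasPrefPair book := by
  unfold solution_alt
  change solBLoop ((PySem.List.sorted book (fun s => s)).zip
      (PySem.List.slice (PySem.List.sorted book (fun s => s)) (some 1) none)) = false ↔ HasPrefPair book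
  have hslice : PySem.List.slice (PySem.List.sorted book (fun s => s)) (some 1) none
      = (PySem.List.sorted book (fun s => s)).drop 1 := by
    simp [pysem]
  rw [hslice, solBLoop_false_iff]
  set L := PySem.List.sorted book (fun s => s) with hLdef
  have hpw : L.Pairwise (· ≤ ·) := PySem.List.sorted_pairwise book (fun s => s)
  have hGE := List.pairwise_iff_getElem.mp hpw
  constructor
  · rintro ⟨⟨a, b⟩, hmem, h0, hne, hpre⟩
    have ha : a ∈ book := by
      rw [← PySem.List.mem_sorted book (fun s => s) false a]
      obtain ⟨i, hi, he⟩ := (zip_tail_mem L (a, b)).mp hmem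
      rw [show a = L[i] from congrArg Prod.fst he]
      exact List.getElem_mem _
    have hb : b ∈ book := by
      rw [← PySem.List.mem_sorted book (fun s => s) false b]
      obtain ⟨i, hi, he⟩ := (zip_tail_mem L (a, b)).mp hmem
      rw [show b = L[i+1] from congrArg Prod.snd he]
      exact List.getElem_mem _
    exact ⟨a, ha, b, hb, h0, hne, hpre⟩
  · rintro ⟨x, hx, y, hy, h0, hne, hpre⟩
    have hxL : x ∈ L := (PySem.List.mem_sorted book (fun s => s) false x).mpr hx
    have hyL : y ∈ L := (PySem.List.mem_sorted book (fun s => s) false y).mpr hy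
    obtain ⟨ix, hix, hxe⟩ := List.mem_iff_getElem.mp hxL
    obtain ⟨iy, hiy, hye⟩ := List.mem_iff_getElem.mp hyL
    have hxlty : x < y := String.lt_iff_toList_lt.mpr (lt_of_proper_prefix _ _ hpre
      (fun he => hne (String.toList_inj.mp he)))
    have horder : ix < iy := by
      rcases lt_trichotomy ix iy with h | h | h
      · exact h
      · exfalso; subst h; exact hne (hxe.symm.trans hye)
      · exfalso
        have := hGE iy ix hiy hix h
        rw [hxe, hye] at this
        exact absurd hxlty (not_lt.mpr this)
    obtain ⟨k, hk, hk0, hkne, hkpre⟩ := adjacent_of_pair L hpw ix iy horder hiy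
      (by rw [hxe, hye]; exact hpre) (by rw [hxe]; exact h0) (by rw [hxe, hye]; exact ne_of_lt hxlty)
    exact ⟨(L[k], L[k+1]), (zip_tail_mem L _).mpr ⟨k, hk, rfl⟩, hk0, hkne, hkpre⟩

-- ===== VERDICT (by name: the statement is the Claim_ definition above) =====
theorem solution_spec : Claim_equal_solution := by
  intro book _
  unfold Spec_solution
  have ha := solution_false_iff book
  have hb := solution_alt_false_iff book
  cases h1 : solution book <;> cases h2 : solution_alt book <;> simp_all
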